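-- pv_equiv track=rewrite | github.com/stanford-oval/Churro | tooling/evaluation/repetition.py | has_long_repetition
-- ===== SOURCE A (Python) =====
-- def has_long_repetition(text: str) -> bool:
--     """Return True when the tail of the string is composed of repeated content."""
--     length = len(text)
--     if length < 2:
--         return False
--
--     reversed_text = text[::-1]
--     prefix_function = [0] * length
--     for i in range(1, length):
--         j = prefix_function[i - 1]
--         while j and reversed_text[i] != reversed_text[j]:
--             j = prefix_function[j - 1]
--         if reversed_text[i] == reversed_text[j]:
--             j += 1
--         prefix_function[i] = j
--
--     max_prefix = int(0.8 * length)
--     for prefix_size in range(1, max_prefix + 1):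
--         remainder = length - prefix_size
--         if remainder < 2:
--             continue
--         border = prefix_function[remainder - 1]
--         period = remainder - border
--         if border > 0 and remainder % period == 0 and remainder // period >= 2:
--             return True
--
--     return False
-- ===== SOURCE B (Python) =====
-- def has_long_repetition(text: str) -> bool:
--     """Return True when the tail of the string is composed of repeated content."""
--     length = len(text)
--     for prefix_size in range(1, int(0.8 * length) + 1):
--         tail = text[prefix_size:]
--         if len(tail) < 2:
--             continue
--         if tail in (tail + tail)[1:-1]:
--             return True
--     return False
-- ===== Notes on version B (the rewrite author's own statement) =====
-- stated objective: idiomatic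
-- what changed: Drops the KMP prefix-function table over the reversed string entirely: each candidate tail is tested directly with the idiomatic rotation trick (membership of the tail in the doubled tail with its first and last characters removed), which holds exactly when the tail is a smaller block repeated at least twice.
import Mathlib
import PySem

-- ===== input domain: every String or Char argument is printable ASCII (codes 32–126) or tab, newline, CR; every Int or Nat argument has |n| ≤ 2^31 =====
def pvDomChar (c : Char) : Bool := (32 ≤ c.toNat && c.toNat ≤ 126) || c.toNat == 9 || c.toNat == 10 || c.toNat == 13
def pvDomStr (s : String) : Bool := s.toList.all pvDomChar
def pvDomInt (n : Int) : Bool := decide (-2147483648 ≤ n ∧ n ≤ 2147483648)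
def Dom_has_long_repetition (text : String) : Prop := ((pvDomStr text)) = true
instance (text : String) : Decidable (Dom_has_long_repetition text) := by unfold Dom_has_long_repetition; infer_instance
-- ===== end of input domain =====

-- B replaces A's KMP prefix-function over the reversed string by the idiomatic per-tail
-- rotation trick: tail in (tail + tail)[1:-1] holds iff the tail is a repeated block.

-- ===== PORT A =====
-- 'while j and reversed_text[i] != reversed_text[j]: j = prefix_function[j-1]':
-- fuel-guarded recursion; the fuel (started at j) only makes the recursion total —
-- each Python iteration strictly decreases j, which the proofs below establish.
def kmpWhile (r : List Char) (pf : List Nat) (c : Char) : Nat → Nat → Nat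
  | 0, j => j
  | fuel+1, j =>
    if j ≠ 0 ∧ r.getD j ' ' ≠ c then kmpWhile r pf c fuel (pf.getD (j-1) 0) else j

-- body of the first for-loop at index i (reads only pf[0..i-1], like the Python)
def kmpStep (r : List Char) (pf : List Nat) (i : Nat) : Nat :=
  let j0 := pf.getD (i-1) 0
  let j := kmpWhile r pf (r.getD i ' ') j0 j0
  if r.getD i ' ' = r.getD j ' ' then j + 1 else j

-- 'prefix_function = [0]*length' filled left to right for i in range(1, length):
-- entry i is written exactly once, so the array is ported as a growing list
def kmpBuild (r : List Char) : List Nat :=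
  (List.range' 1 (r.length - 1)).foldl (fun pf i => pf ++ [kmpStep r pf i]) [0]

-- int(0.8*length) = 4*length/5 exactly for every length here (the rounded float product
-- never crosses the next integer below 2^53); ported as exact integer arithmetic.
def has_long_repetition (text : String) : Bool :=
  let cs := text.toList
  let n := cs.length
  if n < 2 then false
  else
    let r := cs.reverse
    let pf := kmpBuild r
    (List.range' 1 (4 * n / 5)).any fun ps =>
      let rem := n - ps
      if rem < 2 then false
      else
        let b := pf.getD (rem - 1) 0
        let period := rem - b
        decide (0 < b ∧ rem % period = 0 ∧ 2 ≤ rem / period)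

-- ===== PORT B =====
def has_long_repetition_alt (text : String) : Bool :=
  let cs := text.toList
  let n := cs.length
  (List.range' 1 (4 * n / 5)).any fun ps =>
    let tail := cs.drop ps
    if tail.length < 2 then false
    else PySem.Chars.isIn tail (PySem.List.slice (tail ++ tail) (some 1) (some (-1)))

-- ===== PRECONDITION & SPEC =====
def Spec_has_long_repetition (text : String) (out : Bool) : Prop := out = has_long_repetition_alt text
instance (text : String) (out : Bool) : Decidable (Spec_has_long_repetition text out) := by unfold Spec_has_long_repetition; infer_instance

-- ===== CLAIM (what is proved, stated in full; the proofs are below) =====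
def Claim_equal_has_long_repetition : Prop := ∀ (text : String), Dom_has_long_repetition text → Spec_has_long_repetition text (has_long_repetition text)

-- ===== LEMMAS AND PROOFS =====

-- k is a proper border of t: strict prefix of length k that is also a suffix
def IsBorder (k : Nat) (t : List Char) : Prop :=
  k < t.length ∧ t.take k = t.drop (t.length - k)

-- length of the longest proper border
def lb (t : List Char) : Nat :=
  Nat.findGreatest (fun k => t.take k = t.drop (t.length - k)) (t.length - 1)

def HasPeriod (p : Nat) (t : List Char) : Prop :=
  ∀ i, i + p < t.length → t.getD i ' ' = t.getD (i + p) ' '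

lemma lb_lt (t : List Char) (h : t ≠ []) : lb t < t.length := by
  have h1 : 1 ≤ t.length := List.length_pos_iff.mpr h
  have := Nat.findGreatest_le (P := fun k => t.take k = t.drop (t.length - k)) (t.length - 1)
  unfold lb; omega

lemma lb_border (t : List Char) (h : t ≠ []) : IsBorder (lb t) t := by
  refine ⟨lb_lt t h, ?_⟩
  exact Nat.findGreatest_spec (P := fun k => t.take k = t.drop (t.length - k)) (Nat.zero_le _)
    (by show List.take 0 t = List.drop (t.length - 0) t
        simp only [List.take_zero, Nat.sub_zero, List.drop_length])

lemma lb_max {k : Nat} {t : List Char} (h : IsBorder k t) : k ≤ lb t := by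
  obtain ⟨hk, he⟩ := h
  exact Nat.le_findGreatest (by omega) he

lemma getD_take {l : List Char} {i j : Nat} (h : j < i) :
    (l.take i).getD j ' ' = l.getD j ' ' := by
  simp [List.getD, h]

-- borders nest: a smaller border of t is a border of a larger border of t
lemma border_of_lt_border {b k : Nat} {t : List Char}
    (hb : IsBorder b t) (hk : IsBorder k t) (hlt : k < b) : IsBorder k (t.take b) := by
  obtain ⟨hb1, hb2⟩ := hb
  obtain ⟨hk1, hk2⟩ := hk
  have hlen : (t.take b).length = b := by rw [List.length_take]; omega
  refine ⟨by omega, ?_⟩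
  rw [hlen, List.take_take, min_eq_left (by omega), hk2, hb2, List.drop_drop]
  congr 1; omega

-- and conversely: a border of a border is a border
lemma border_of_border {b k : Nat} {t : List Char}
    (hb : IsBorder b t) (hk : IsBorder k (t.take b)) : IsBorder k t := by
  obtain ⟨hb1, hb2⟩ := hb
  obtain ⟨hk1, hk2⟩ := hk
  have hlen : (t.take b).length = b := by rw [List.length_take]; omega
  rw [hlen] at hk1 hk2
  refine ⟨by omega, ?_⟩
  rw [List.take_take, min_eq_left (by omega), hb2, List.drop_drop] at hk2
  rw [hk2]; congr 1; omega

lemma take_succ_getD {l : List Char} {i : Nat} (h : i < l.length) :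
    l.take (i+1) = l.take i ++ [l.getD i ' '] := by
  rw [List.take_add_one]
  congr 1
  simp [List.getD, List.getElem?_eq_getElem h]

-- borders of t ++ [c] of positive length are exactly matching borders of t, plus one
lemma border_snoc {k : Nat} {t : List Char} {c : Char} (hk : k < t.length) :
    IsBorder (k+1) (t ++ [c]) ↔ IsBorder k t ∧ t.getD k ' ' = c := by
  have hlen : (t ++ [c]).length = t.length + 1 := by simp
  have hdrop : (t ++ [c]).drop (t.length + 1 - (k+1)) = t.drop (t.length - k) ++ [c] := by
    rw [List.drop_append_of_le_length (by omega)]; congr 2; omega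
  have htake : (t ++ [c]).take (k+1) = t.take k ++ [t.getD k ' '] := by
    rw [List.take_append_of_le_length (by omega), take_succ_getD hk]
  constructor
  · rintro ⟨h1, h2⟩
    rw [hlen] at h2; rw [hdrop, htake] at h2
    have hl1 : (t.take k).length = k := by rw [List.length_take]; omega
    have hl2 : (t.drop (t.length - k)).length = k := by rw [List.length_drop]; omega
    obtain ⟨e1, e2⟩ := List.append_inj h2 (by rw [hl1, hl2])
    exact ⟨⟨by omega, e1⟩, by simpa using e2⟩
  · rintro ⟨⟨h1, h2⟩, h3⟩
    refine ⟨by rw [hlen]; omega, ?_⟩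
    rw [hlen, hdrop, htake, h2, h3]

-- characterization of lb (t ++ [c]) when some border of t matches c
lemma lb_snoc_of_match {j : Nat} {t : List Char} {c : Char}
    (hj : IsBorder j t) (hc : t.getD j ' ' = c)
    (hmax : ∀ k, IsBorder k t → t.getD k ' ' = c → k ≤ j) :
    lb (t ++ [c]) = j + 1 := by
  have hne : t ++ [c] ≠ [] := by simp
  have hb : IsBorder (j+1) (t ++ [c]) := (border_snoc hj.1).mpr ⟨hj, hc⟩
  have hge := lb_max hb
  have hlbb := lb_border _ hne
  rcases Nat.eq_zero_or_pos (lb (t ++ [c])) with h0 | h0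
  · omega
  · obtain ⟨k, hk⟩ : ∃ k, lb (t ++ [c]) = k + 1 := ⟨lb (t ++ [c]) - 1, by omega⟩
    rw [hk] at hlbb
    have hklt : k < t.length := by
      have := hlbb.1
      simp only [List.length_append, List.length_cons, List.length_nil] at this
      omega
    obtain ⟨hkb, hkc⟩ := (border_snoc hklt).mp hlbb
    have := hmax k hkb hkc
    omega

-- and when no border of t matches c
lemma lb_snoc_of_no_match {t : List Char} {c : Char}
    (hnone : ∀ k, IsBorder k t → t.getD k ' ' ≠ c) :
    lb (t ++ [c]) = 0 := by
  have hne : t ++ [c] ≠ [] := by simp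
  have hlbb := lb_border _ hne
  rcases Nat.eq_zero_or_pos (lb (t ++ [c])) with h0 | h0
  · exact h0
  · obtain ⟨k, hk⟩ : ∃ k, lb (t ++ [c]) = k + 1 := ⟨lb (t ++ [c]) - 1, by omega⟩
    rw [hk] at hlbb
    have hklt : k < t.length := by
      have := hlbb.1
      simp only [List.length_append, List.length_cons, List.length_nil] at this
      omega
    obtain ⟨hkb, hkc⟩ := (border_snoc hklt).mp hlbb
    exact absurd hkc (hnone k hkb)

-- correctness of the fuel-guarded while loop
lemma kmpWhile_spec (r : List Char) (pf : List Nat) (i : Nat) (hi : i < r.length)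
    (hpf : ∀ m, 1 ≤ m → m ≤ i → pf.getD (m-1) 0 = lb (r.take m)) :
    ∀ fuel j, j ≤ fuel → IsBorder j (r.take i) →
      (∀ k, IsBorder k (r.take i) → (r.take i).getD k ' ' = r.getD i ' ' → k ≤ j) →
      IsBorder (kmpWhile r pf (r.getD i ' ') fuel j) (r.take i) ∧
      (∀ k, IsBorder k (r.take i) → (r.take i).getD k ' ' = r.getD i ' ' →
        k ≤ kmpWhile r pf (r.getD i ' ') fuel j) ∧
      ((r.take i).getD (kmpWhile r pf (r.getD i ' ') fuel j) ' ' = r.getD i ' ' ∨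
        kmpWhile r pf (r.getD i ' ') fuel j = 0) := by
  intro fuel
  induction fuel with
  | zero =>
    intro j hj hb hmax
    interval_cases j
    exact ⟨hb, hmax, Or.inr rfl⟩
  | succ fuel ih =>
    intro j hj hb hmax
    have htlen : (r.take i).length = i := by rw [List.length_take]; omega
    by_cases hcond : j ≠ 0 ∧ r.getD j ' ' ≠ r.getD i ' '
    · rw [kmpWhile, if_pos hcond]
      have hjlt : j < i := by have := hb.1; omega
      have hrt : (r.take i).getD j ' ' = r.getD j ' ' := getD_take hjlt
      have hjne : (r.take i).getD j ' ' ≠ r.getD i ' ' := by rw [hrt]; exact hcond.2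
      have hpfj : pf.getD (j-1) 0 = lb (r.take j) := hpf j (by omega) (by omega)
      have hrtj : (r.take i).take j = r.take j := by
        rw [List.take_take, min_eq_left (by omega)]
      have htjlen : (r.take j).length = j := by rw [List.length_take]; omega
      have htjne : r.take j ≠ [] := by
        intro h; rw [h] at htjlen; simp at htjlen; omega
      have hlbj : lb (r.take j) < j := by have := lb_lt _ htjne; omega
      have hbj : IsBorder (lb (r.take j)) (r.take i) := by
        apply border_of_border hb
        rw [hrtj]; exact lb_border _ htjne
      have hmaxj : ∀ k, IsBorder k (r.take i) → (r.take i).getD k ' ' = r.getD i ' ' →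
          k ≤ lb (r.take j) := by
        intro k hkb hkc
        have hkj := hmax k hkb hkc
        have hkjlt : k < j := by
          rcases Nat.lt_or_ge k j with h | h
          · exact h
          · exfalso; have hkj' : k = j := by omega
            rw [hkj'] at hkc; exact hjne hkc
        have hb' : IsBorder k ((r.take i).take j) :=
          border_of_lt_border hb hkb hkjlt
        rw [hrtj] at hb'
        exact lb_max hb'
      rw [hpfj]
      exact ih (lb (r.take j)) (by omega) hbj hmaxj
    · rw [kmpWhile, if_neg hcond]
      refine ⟨hb, hmax, ?_⟩
      by_cases hj0 : j = 0
      · exact Or.inr hj0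
      · left
        have hje : r.getD j ' ' = r.getD i ' ' := by
          by_contra hne
          exact hcond ⟨hj0, hne⟩
        have hjlt : j < i := by have := hb.1; omega
        rw [getD_take hjlt]; exact hje

-- the loop body computes the longest border of the next prefix
lemma kmpStep_spec (r : List Char) (pf : List Nat) (i : Nat) (hi : i < r.length) (hi1 : 1 ≤ i)
    (hpf : ∀ m, 1 ≤ m → m ≤ i → pf.getD (m-1) 0 = lb (r.take m)) :
    kmpStep r pf i = lb (r.take (i+1)) := by
  have htlen : (r.take i).length = i := by rw [List.length_take]; omega
  have htne : r.take i ≠ [] := by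
    intro h; rw [h] at htlen; simp at htlen; omega
  have hj0 : pf.getD (i-1) 0 = lb (r.take i) := hpf i hi1 le_rfl
  have hb0 : IsBorder (lb (r.take i)) (r.take i) := lb_border _ htne
  have hmax0 : ∀ k, IsBorder k (r.take i) → (r.take i).getD k ' ' = r.getD i ' ' →
      k ≤ lb (r.take i) := fun k hk _ => lb_max hk
  obtain ⟨hjb, hjmax, hjend⟩ :=
    kmpWhile_spec r pf i hi hpf (pf.getD (i-1) 0) (pf.getD (i-1) 0) le_rfl
      (by rw [hj0]; exact hb0) (by rw [hj0]; exact hmax0)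
  simp only [kmpStep]
  set j := kmpWhile r pf (r.getD i ' ') (pf.getD (i-1) 0) (pf.getD (i-1) 0) with hjdef
  have hsucc : r.take (i+1) = r.take i ++ [r.getD i ' '] := take_succ_getD hi
  have hjlt : j < i := by have := hjb.1; omega
  rw [hsucc]
  by_cases hmatch : r.getD i ' ' = r.getD j ' '
  · rw [if_pos hmatch]
    have hc : (r.take i).getD j ' ' = r.getD i ' ' := by
      rw [getD_take hjlt]; exact hmatch.symm
    exact (lb_snoc_of_match hjb hc hjmax).symm
  · rw [if_neg hmatch]
    have hj0' : j = 0 := by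
      rcases hjend with h | h
      · exfalso; rw [getD_take hjlt] at h; exact hmatch h.symm
      · exact h
    rw [hj0']
    symm
    apply lb_snoc_of_no_match
    intro k hk hkc
    have := hjmax k hk hkc
    have hk0 : k = 0 := by omega
    rw [hk0] at hkc
    rw [hj0'] at hmatch
    rw [getD_take (by omega)] at hkc
    exact hmatch hkc.symm

-- the built table is the longest-border table
lemma kmpBuild_aux (r : List Char) (s : Nat) (hs : s ≤ r.length - 1) (h1 : 1 ≤ r.length) :
    ((List.range' 1 s).foldl (fun pf i => pf ++ [kmpStep r pf i]) [0]).length = s + 1 ∧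
    ∀ m, 1 ≤ m → m ≤ s + 1 →
      ((List.range' 1 s).foldl (fun pf i => pf ++ [kmpStep r pf i]) [0]).getD (m-1) 0 =
        lb (r.take m) := by
  induction s with
  | zero =>
    refine ⟨by simp, ?_⟩
    intro m hm1 hm2
    have hm : m = 1 := by omega
    subst hm
    have hlt : (List.take 1 r).length - 1 = 0 := by rw [List.length_take]; omega
    simp [lb]
  | succ s ih =>
    obtain ⟨ihl, ihp⟩ := ih (by omega)
    set pf := (List.range' 1 s).foldl (fun pf i => pf ++ [kmpStep r pf i]) [0] with hpfdef
    have hlen' : pf.length = s + 1 := by rw [hpfdef]; exact ihl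
    have hconcat : List.range' 1 (s+1) = List.range' 1 s ++ [1 + s] := by
      rw [List.range'_concat, one_mul]
    rw [hconcat, List.foldl_append]
    simp only [List.foldl_cons, List.foldl_nil]
    rw [← hpfdef]
    have hstep : kmpStep r pf (1 + s) = lb (r.take (1 + s + 1)) := by
      apply kmpStep_spec r pf (1+s) (by omega) (by omega)
      intro m hm1 hm2
      exact ihp m hm1 (by omega)
    constructor
    · simp [ihl]
    · intro m hm1 hm2
      rcases Nat.lt_or_ge m (s + 2) with h | h
      · rw [List.getD, List.getElem?_append_left (by rw [hlen']; omega), ← List.getD]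
        exact ihp m hm1 (by omega)
      · have hm : m = s + 2 := by omega
        subst hm
        rw [List.getD, List.getElem?_append_right (by rw [hlen']; omega)]
        have hz : s + 2 - 1 - pf.length = 0 := by rw [hlen']; omega
        rw [hz]
        simp only [List.getElem?_cons_zero, Option.getD_some]
        rw [hstep, show 1 + s + 1 = s + 2 by omega]

lemma kmpBuild_spec (r : List Char) (h1 : 1 ≤ r.length) :
    ∀ m, 1 ≤ m → m ≤ r.length → (kmpBuild r).getD (m-1) 0 = lb (r.take m) := by
  intro m hm1 hm2
  exact (kmpBuild_aux r (r.length - 1) le_rfl h1).2 m hm1 (by omega)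

-- ===== borders, periods and powers =====

lemma border_iff_period {k : Nat} {t : List Char} (hk : k < t.length) :
    (t.take k = t.drop (t.length - k)) ↔ HasPeriod (t.length - k) t := by
  have hl1 : (t.take k).length = k := by rw [List.length_take]; omega
  have hl2 : (t.drop (t.length - k)).length = k := by rw [List.length_drop]; omega
  constructor
  · intro he i hi
    have hik : i < k := by omega
    have e1 : (t.take k).getD i ' ' = t.getD i ' ' := getD_take hik
    have e2 : (t.drop (t.length - k)).getD i ' ' = t.getD (t.length - k + i) ' ' := by
      simp [List.getD, List.getElem?_drop]
    have e3 : t.getD i ' ' = t.getD (t.length - k + i) ' ' := by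
      rw [← e1, ← e2, he]
    rw [e3]; congr 1; omega
  · intro hp
    apply List.ext_getElem (by omega)
    intro i hi1 hi2
    rw [hl1] at hi1
    have e := hp i (by omega)
    simp only [List.getD, List.getElem?_eq_getElem (show i < t.length by omega),
      List.getElem?_eq_getElem (show i + (t.length - k) < t.length by omega),
      Option.getD_some] at e
    rw [List.getElem_take, List.getElem_drop]
    rw [e]
    congr 1
    omega

lemma period_reverse {p : Nat} {t : List Char} (hp : HasPeriod p t) :
    HasPeriod p t.reverse := by
  intro i hi
  simp only [List.length_reverse] at hi
  have e := hp (t.length - 1 - (i + p)) (by omega)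
  simp only [List.getD,
    List.getElem?_eq_getElem (show i < t.reverse.length by rw [List.length_reverse]; omega),
    List.getElem?_eq_getElem (show i + p < t.reverse.length by rw [List.length_reverse]; omega),
    Option.getD_some, List.getElem_reverse]
  simp only [List.getD,
    List.getElem?_eq_getElem (show t.length - 1 - (i + p) < t.length by omega),
    List.getElem?_eq_getElem (show t.length - 1 - (i + p) + p < t.length by omega),
    Option.getD_some] at e
  have e1 : t.length - 1 - i = t.length - 1 - (i + p) + p := by omega
  simp_rw [e1, ← e]

lemma getD_flatten_replicate {w : List Char} {p : Nat} (hw : w.length = p) (hp1 : 1 ≤ p) :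
    ∀ k j, j < k * p → ((List.replicate k w).flatten).getD j ' ' = w.getD (j % p) ' ' := by
  intro k
  induction k with
  | zero => intro j hj; omega
  | succ k ihk =>
    intro j hj
    have hj' : j < k * p + p := by
      have he : (k + 1) * p = k * p + p := by ring
      omega
    rw [List.replicate_succ, List.flatten_cons]
    rcases Nat.lt_or_ge j p with hjp | hjp
    · rw [List.getD, List.getElem?_append_left (by omega), ← List.getD, Nat.mod_eq_of_lt hjp]
    · rw [List.getD, List.getElem?_append_right (by omega), ← List.getD, hw]
      rw [ihk (j - p) (by omega)]
      have hmm : j % p = (j - p) % p := by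
        conv_lhs => rw [show j = p + (j - p) by omega]
        rw [Nat.add_mod_left]
      rw [hmm]

-- a p-periodic list whose length is a multiple of p is its p-prefix repeated
lemma period_to_power {p : Nat} (k : Nat) (u : List Char) (hp1 : 1 ≤ p)
    (hlen : u.length = k * p) (hper : HasPeriod p u) :
    u = (List.replicate k (u.take p)).flatten := by
  induction k generalizing u with
  | zero =>
    have h0 : u.length = 0 := by simpa using hlen
    rw [List.length_eq_zero_iff.mp h0]
    simp
  | succ k ih =>
    have hkp1 : u.length = k * p + p := by rw [hlen]; ring
    have hpu : p ≤ u.length := by omega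
    have hsplit : u = u.take p ++ u.drop p := (List.take_append_drop p u).symm
    have hdlen : (u.drop p).length = k * p := by rw [List.length_drop]; omega
    have hdper : HasPeriod p (u.drop p) := by
      intro i hi
      rw [List.length_drop] at hi
      have e := hper (i + p) (by omega)
      simp only [List.getD, List.getElem?_drop] at e ⊢
      rw [show p + i = i + p by omega, show p + (i + p) = i + p + p by omega]
      exact e
    have hih := ih (u.drop p) hdlen hdper
    rcases Nat.eq_zero_or_pos k with hk0 | hkpos
    · subst hk0
      have hd : u.drop p = [] := List.length_eq_zero_iff.mp (by simpa using hdlen)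
      rw [List.replicate_one, List.flatten_cons, List.flatten_nil, List.append_nil]
      conv_lhs => rw [hsplit]
      rw [hd, List.append_nil]
    · have hkp' : p ≤ k * p := Nat.le_mul_of_pos_left p hkpos
      have htp : (u.drop p).take p = u.take p := by
        have hdtp : ((u.drop p).take p).length = p := by
          rw [List.length_take, List.length_drop]; omega
        have hutp : (u.take p).length = p := by rw [List.length_take]; omega
        apply List.ext_getElem (by rw [hdtp, hutp])
        intro i hi1 hi2
        rw [hdtp] at hi1
        rw [List.getElem_take, List.getElem_take, List.getElem_drop]
        have e := hper i (by omega)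
        simp only [List.getD, List.getElem?_eq_getElem (show i < u.length by omega),
          List.getElem?_eq_getElem (show i + p < u.length by omega), Option.getD_some] at e
        have hix : p + i = i + p := by omega
        simp_rw [hix]
        exact e.symm
      rw [List.replicate_succ, List.flatten_cons]
      conv_lhs => rw [hsplit]
      congr 1
      rw [hih, htp]

lemma power_to_period {p : Nat} (k : Nat) (u : List Char) (hp1 : 1 ≤ p)
    (hlen : u.length = k * p) (hpow : u = (List.replicate k (u.take p)).flatten) :
    HasPeriod p u := by
  intro i hi
  have hw : (u.take p).length = p := by rw [List.length_take]; omega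
  have key : ∀ j, j < u.length → u.getD j ' ' = (u.take p).getD (j % p) ' ' := by
    intro j hj
    conv_lhs => rw [hpow]
    exact getD_flatten_replicate hw hp1 k j (by omega)
  rw [key i (by omega), key (i + p) (by omega)]
  congr 1
  exact (Nat.add_mod_right i p).symm

-- the subtraction step of the periodicity argument
lemma period_sub {p q : Nat} {t : List Char} (hq1 : 1 ≤ q) (hqp : q < p)
    (hpq : p + q ≤ t.length) (hp : HasPeriod p t) (hq : HasPeriod q t) :
    HasPeriod (p - q) t := by
  intro i hi
  rcases Nat.lt_or_ge (i + p) t.length with h | h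
  · have e1 := hp i h
    have e2 := hq (i + (p - q)) (by omega)
    rw [show i + (p - q) + q = i + p by omega] at e2
    rw [e1, e2]
  · have hiq : q ≤ i := by omega
    have e1 := hq (i - q) (by omega)
    have e2 := hp (i - q) (by omega)
    rw [show i - q + q = i by omega] at e1
    rw [show i - q + p = i + (p - q) by omega] at e2
    rw [← e1, e2]

-- weak Fine–Wilf: two periods that fit in the word force their gcd as a period
lemma fine_wilf (t : List Char) :
    ∀ s p q, p + q ≤ s → 1 ≤ p → 1 ≤ q → p + q ≤ t.length →
      HasPeriod p t → HasPeriod q t → HasPeriod (Nat.gcd p q) t := by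
  intro s
  induction s using Nat.strong_induction_on with
  | _ s ih =>
    intro p q hsum hp1 hq1 hpq hp hq
    rcases Nat.lt_trichotomy p q with h | h | h
    · have hsub : HasPeriod (q - p) t := period_sub hp1 h (by omega) hq hp
      have hrec := ih q (by omega) p (q - p) (by omega) hp1 (by omega) (by omega) hp hsub
      rwa [Nat.gcd_sub_self_right (by omega)] at hrec
    · subst h
      simpa [Nat.gcd_self] using hp
    · have hsub : HasPeriod (p - q) t := period_sub hq1 h (by omega) hp hq
      have hrec := ih p (by omega) (p - q) q (by omega) (by omega) hq1 (by omega) hsub hq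
      rwa [Nat.gcd_comm, Nat.gcd_sub_self_right (by omega), Nat.gcd_comm] at hrec

-- border-of-the-reverse ↔ period-of-the-reverse, phrased with u.length
lemma border_period_rev (u : List Char) (k : Nat) (hk : k < u.length) :
    IsBorder k u.reverse ↔ HasPeriod (u.length - k) u.reverse := by
  have h := border_iff_period (t := u.reverse) (k := k)
    (by rw [List.length_reverse]; omega)
  rw [List.length_reverse] at h
  constructor
  · intro hb
    have h2 := hb.2
    rw [List.length_reverse] at h2
    exact h.mp h2
  · intro hp
    refine ⟨by rw [List.length_reverse]; omega, ?_⟩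
    rw [List.length_reverse]
    exact h.mpr hp

-- A's arithmetic test on the longest border ↔ B's divisor test on the tail
lemma cond_iff (u : List Char) (hL : 2 ≤ u.length) :
    (0 < lb u.reverse ∧ u.length % (u.length - lb u.reverse) = 0 ∧
      2 ≤ u.length / (u.length - lb u.reverse)) ↔
    (∃ p, (1 ≤ p ∧ p < u.length) ∧ u.length % p = 0 ∧
      u = (List.replicate (u.length / p) (u.take p)).flatten) := by
  have hrlen : u.reverse.length = u.length := List.length_reverse
  have hrne : u.reverse ≠ [] := by
    intro h; rw [h] at hrlen; simp at hrlen; omega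
  have hblt : lb u.reverse < u.length := by have := lb_lt _ hrne; omega
  have hlbper : HasPeriod (u.length - lb u.reverse) u.reverse :=
    (border_period_rev u (lb u.reverse) hblt).mp (lb_border _ hrne)
  constructor
  · rintro ⟨hb, hmod, _⟩
    have hq1 : 1 ≤ u.length - lb u.reverse := by omega
    have hqL : u.length - lb u.reverse < u.length := by omega
    have hdvd : (u.length - lb u.reverse) ∣ u.length := Nat.dvd_of_mod_eq_zero hmod
    have hperu : HasPeriod (u.length - lb u.reverse) u := by
      have := period_reverse hlbper
      rwa [List.reverse_reverse] at this
    refine ⟨u.length - lb u.reverse, ⟨hq1, hqL⟩, hmod, ?_⟩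
    exact period_to_power _ u hq1 (by rw [Nat.div_mul_cancel hdvd]) hperu
  · rintro ⟨p, ⟨hp1, hpL⟩, hmod, hpow⟩
    have hdvd : p ∣ u.length := Nat.dvd_of_mod_eq_zero hmod
    have hperu : HasPeriod p u :=
      power_to_period (u.length / p) u hp1 (by rw [Nat.div_mul_cancel hdvd]) hpow
    have hper : HasPeriod p u.reverse := period_reverse hperu
    have hLp : 2 * p ≤ u.length := by
      obtain ⟨m, hm⟩ := hdvd
      have hm2 : 2 ≤ m := by
        rcases Nat.lt_or_ge m 2 with hm' | hm'
        · interval_cases m <;> omega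
        · exact hm'
      calc 2 * p = p * 2 := by ring
        _ ≤ p * m := Nat.mul_le_mul_left p hm2
        _ = u.length := hm.symm
    have hbord : IsBorder (u.length - p) u.reverse :=
      (border_period_rev u (u.length - p) (by omega)).mpr
        (by rw [show u.length - (u.length - p) = p by omega]; exact hper)
    have hble : u.length - p ≤ lb u.reverse := lb_max hbord
    have hb : 0 < lb u.reverse := by omega
    have hq1 : 1 ≤ u.length - lb u.reverse := by omega
    have hqp : u.length - lb u.reverse ≤ p := by omega
    have hg : HasPeriod (Nat.gcd p (u.length - lb u.reverse)) u.reverse :=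
      fine_wilf u.reverse (p + (u.length - lb u.reverse)) p (u.length - lb u.reverse)
        le_rfl hp1 hq1 (by rw [hrlen]; omega) hper hlbper
    have hg1 : 0 < Nat.gcd p (u.length - lb u.reverse) := Nat.gcd_pos_of_pos_left _ (by omega)
    have hgq : Nat.gcd p (u.length - lb u.reverse) ≤ u.length - lb u.reverse :=
      Nat.le_of_dvd (by omega) (Nat.gcd_dvd_right _ _)
    have hgbord : IsBorder (u.length - Nat.gcd p (u.length - lb u.reverse)) u.reverse :=
      (border_period_rev u (u.length - Nat.gcd p (u.length - lb u.reverse)) (by omega)).mpr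
        (by
          rw [show u.length - (u.length - Nat.gcd p (u.length - lb u.reverse)) =
            Nat.gcd p (u.length - lb u.reverse) by omega]
          exact hg)
    have hgble : u.length - Nat.gcd p (u.length - lb u.reverse) ≤ lb u.reverse := lb_max hgbord
    have hgeq : Nat.gcd p (u.length - lb u.reverse) = u.length - lb u.reverse := by omega
    have hqdvdp : (u.length - lb u.reverse) ∣ p := hgeq ▸ Nat.gcd_dvd_left _ _
    have hqdvd : (u.length - lb u.reverse) ∣ u.length := hqdvdp.trans hdvd
    refine ⟨hb, (Nat.dvd_iff_mod_eq_zero).mp hqdvd, ?_⟩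
    rw [Nat.le_div_iff_mul_le (by omega : 0 < u.length - lb u.reverse)]
    omega

-- xs[1:-1] for a list of length ≥ 2
lemma slice_one_negone {α : Type} (xs : List α) (h : 2 ≤ xs.length) :
    PySem.List.slice xs (some 1) (some (-1)) = (xs.drop 1).take (xs.length - 2) := by
  simp only [PySem.List.slice, PySem.List.clampIdx]
  rw [if_neg (by norm_num : ¬ ((1:Int) < 0)), if_pos (by norm_num : ((-1:Int) < 0)),
    if_neg (by omega : ¬ ((xs.length : Int) + (-1) < 0))]
  have h4 : min (1:Int).toNat xs.length = 1 := by
    simp only [Int.toNat_one]; omega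
  rw [h4]
  congr 1
  omega

-- multiples of a period are periods
lemma period_mul {q : Nat} {t : List Char} (hq : HasPeriod q t) :
    ∀ m, HasPeriod (m * q) t := by
  intro m
  induction m with
  | zero => intro i hi; simp
  | succ m ih =>
    intro i hi
    have hmul : (m + 1) * q = m * q + q := by ring
    have e1 := hq i (by omega)
    have e2 := ih (i + q) (by omega)
    rw [e1, e2]
    congr 1
    omega

-- u is a prefix of (u ++ u) shifted by r  ↔  r and L - r are both periods of u
lemma prefix_drop_iff_periods (u : List Char) (r : Nat) (hr1 : 1 ≤ r) (hrL : r < u.length) :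
    (u <+: (u ++ u).drop r) ↔ (HasPeriod r u ∧ HasPeriod (u.length - r) u) := by
  have hda : (u ++ u).drop r = u.drop r ++ u := List.drop_append_of_le_length (by omega)
  have hdalen : (u.drop r ++ u).length = 2 * u.length - r := by
    rw [List.length_append, List.length_drop]; omega
  have hgetd : ∀ i, i < 2 * u.length - r → (u.drop r ++ u).getD i ' ' =
      (if i < u.length - r then u.getD (r + i) ' ' else u.getD (i - (u.length - r)) ' ') := by
    intro i hi
    by_cases hc : i < u.length - r
    · rw [if_pos hc, List.getD, List.getElem?_append_left (by rw [List.length_drop]; omega),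
        List.getElem?_drop, ← List.getD]
    · rw [if_neg hc, List.getD, List.getElem?_append_right (by rw [List.length_drop]; omega),
        List.length_drop, ← List.getD]
  rw [hda]
  constructor
  · intro hpre
    have heq : u = (u.drop r ++ u).take u.length := List.prefix_iff_eq_take.mp hpre
    have hpt : ∀ i, i < u.length → u.getD i ' ' = (u.drop r ++ u).getD i ' ' := by
      intro i hig
      conv_lhs => rw [heq]
      rw [getD_take hig]
    constructor
    · intro i hi
      have h1 := hpt i (by omega)
      rw [hgetd i (by omega), if_pos (by omega)] at h1
      rw [h1]; congr 1; omega
    · intro i hi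
      have h1 := hpt (i + (u.length - r)) (by omega)
      rw [hgetd (i + (u.length - r)) (by omega), if_neg (by omega)] at h1
      rw [show i + (u.length - r) - (u.length - r) = i by omega] at h1
      exact h1.symm
  · rintro ⟨hp1, hp2⟩
    rw [List.prefix_iff_eq_take]
    apply List.ext_getElem (by rw [List.length_take]; omega)
    intro i hi1 hi2
    have hgoal : u.getD i ' ' = (u.drop r ++ u).getD i ' ' := by
      rw [hgetd i (by omega)]
      by_cases hc : i < u.length - r
      · rw [if_pos hc]
        have := hp1 i (by omega)
        rw [this]; congr 1; omega
      · rw [if_neg hc]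
        have := hp2 (i - (u.length - r)) (by omega)
        rw [show i - (u.length - r) + (u.length - r) = i by omega] at this
        exact this.symm
    have hiu : i < u.length := hi1
    have hida : i < (u.drop r ++ u).length := by omega
    simp only [List.getD, List.getElem?_eq_getElem hiu, List.getElem?_eq_getElem hida,
      Option.getD_some] at hgoal
    rw [List.getElem_take]
    exact hgoal

-- B's rotation test ↔ the divisor / repeated-block condition
lemma isIn_iff_pdiv (u : List Char) (hL : 2 ≤ u.length) :
    PySem.Chars.isIn u (PySem.List.slice (u ++ u) (some 1) (some (-1))) = true ↔
    (∃ p, (1 ≤ p ∧ p < u.length) ∧ u.length % p = 0 ∧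
      u = (List.replicate (u.length / p) (u.take p)).flatten) := by
  have hwlen : (u ++ u).length = 2 * u.length := by rw [List.length_append]; omega
  have hmid : PySem.List.slice (u ++ u) (some 1) (some (-1)) =
      ((u ++ u).drop 1).take (2 * u.length - 2) := by
    rw [slice_one_negone _ (by omega), hwlen]
  rw [hmid, ← PySem.Chars.exists_prefix_drop_iff_isIn]
  have hstep : ∀ j : Nat, (u <+: (((u ++ u).drop 1).take (2 * u.length - 2)).drop j) ↔
      (u <+: (u ++ u).drop (1 + j) ∧ u.length ≤ 2 * u.length - 2 - j) := by
    intro j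
    rw [List.drop_take, List.drop_drop, List.prefix_take_iff,
      show 1 + j = j + 1 from by omega]
  constructor
  · rintro ⟨j, hj⟩
    obtain ⟨hpre, hlen⟩ := (hstep j).mp hj
    have hr1 : 1 ≤ 1 + j := by omega
    have hrL : 1 + j < u.length := by omega
    obtain ⟨hp1, hp2⟩ := (prefix_drop_iff_periods u (1 + j) hr1 hrL).mp hpre
    have hsum : (1 + j) + (u.length - (1 + j)) = u.length := by omega
    have hg : HasPeriod (Nat.gcd (1 + j) (u.length - (1 + j))) u :=
      fine_wilf u u.length (1 + j) (u.length - (1 + j)) (by omega) (by omega) (by omega)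
        (by omega) hp1 hp2
    have hgdvd : Nat.gcd (1 + j) (u.length - (1 + j)) ∣ u.length := by
      have hd := Nat.dvd_add (Nat.gcd_dvd_left (1 + j) (u.length - (1 + j)))
        (Nat.gcd_dvd_right (1 + j) (u.length - (1 + j)))
      rwa [hsum] at hd
    have hgpos : 0 < Nat.gcd (1 + j) (u.length - (1 + j)) :=
      Nat.gcd_pos_of_pos_left _ (by omega)
    have hgle : Nat.gcd (1 + j) (u.length - (1 + j)) ≤ 1 + j :=
      Nat.le_of_dvd (by omega) (Nat.gcd_dvd_left _ _)
    refine ⟨Nat.gcd (1 + j) (u.length - (1 + j)), ⟨by omega, by omega⟩,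
      (Nat.dvd_iff_mod_eq_zero).mp hgdvd, ?_⟩
    exact period_to_power _ u (by omega) (by rw [Nat.div_mul_cancel hgdvd]) hg
  · rintro ⟨p, ⟨hp1, hpL⟩, hmod, hpow⟩
    have hdvd : p ∣ u.length := Nat.dvd_of_mod_eq_zero hmod
    have hper : HasPeriod p u :=
      power_to_period (u.length / p) u hp1 (by rw [Nat.div_mul_cancel hdvd]) hpow
    have hqm : (u.length / p - 1) * p = u.length - p := by
      rw [Nat.sub_mul, Nat.div_mul_cancel hdvd, one_mul]
    have hper2 : HasPeriod (u.length - p) u := by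
      have := period_mul hper (u.length / p - 1)
      rwa [hqm] at this
    refine ⟨p - 1, (hstep (p - 1)).mpr ⟨?_, by omega⟩⟩
    rw [show 1 + (p - 1) = p from by omega]
    exact (prefix_drop_iff_periods u p hp1 hpL).mpr ⟨hper, hper2⟩

-- ===== VERDICT (by name: the statement is the Claim_ definition above) =====
theorem has_long_repetition_spec : Claim_equal_has_long_repetition := by
  intro text _
  unfold Spec_has_long_repetition
  simp only [has_long_repetition, has_long_repetition_alt]
  by_cases hn : text.toList.length < 2
  · rw [if_pos hn]
    have h0 : 4 * text.toList.length / 5 = 0 := by omega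
    rw [h0]
    simp
  · rw [if_neg hn]
    refine List.any_congr rfl ?_
    intro ps
    have hdl : (text.toList.drop ps).length = text.toList.length - ps := List.length_drop
    by_cases hrem : text.toList.length - ps < 2
    · rw [if_pos hrem, if_pos (by rw [hdl]; exact hrem)]
    · rw [if_neg hrem, if_neg (by rw [hdl]; exact hrem)]
      have hps : ps + 2 ≤ text.toList.length := by omega
      have hb := kmpBuild_spec text.toList.reverse (by rw [List.length_reverse]; omega)
        (text.toList.length - ps) (by omega) (by rw [List.length_reverse]; omega)
      have hrev : text.toList.reverse.take (text.toList.length - ps)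
          = (text.toList.drop ps).reverse := (List.reverse_drop).symm
      rw [hb, hrev]
      have hL : 2 ≤ (text.toList.drop ps).length := by omega
      rw [Bool.eq_iff_iff]
      simp only [decide_eq_true_eq]
      rw [isIn_iff_pdiv _ hL]
      constructor
      · intro h
        have h' : 0 < lb (text.toList.drop ps).reverse ∧
            (text.toList.drop ps).length %
              ((text.toList.drop ps).length - lb (text.toList.drop ps).reverse) = 0 ∧
            2 ≤ (text.toList.drop ps).length /
              ((text.toList.drop ps).length - lb (text.toList.drop ps).reverse) := by
          rw [hdl]; exact h
        exact (cond_iff _ hL).mp h'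
      · intro h
        have h' := (cond_iff _ hL).mpr h
        rw [hdl] at h'
        exact h'
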